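-- pv_equiv track=rewrite | github.com/TzlilOvadia/Optimal-Image-Quantization | main.py | initQuants
-- ===== SOURCE A (Python) =====
-- def initQuants(hist_seg):
--     quants = []
--     z_curr = 0
--     idx_curr = 0
--     for i in hist_seg:
--         if i == 0:
--             continue
--         quants.append( int(z_curr+(i-z_curr)/2))
--         idx_curr += 1
--         z_curr = i
--     return quants
-- ===== SOURCE B (Python) =====
-- def initQuants(hist_seg):
--     # Traverse right-to-left tracking the NEXT nonzero value (the successor),
--     # emit each midpoint back-to-front, then reverse the result.
--     rev = []
--     succ = None
--     for x in reversed(hist_seg):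
--         if x == 0:
--             continue
--         if succ is not None:
--             rev.append(int(x + (succ - x) / 2))
--         succ = x
--     if succ is not None:
--         rev.append(int(succ / 2))
--     rev.reverse()
--     return rev
-- ===== Notes on version B (the rewrite author's own statement) =====
-- stated objective: alternative
-- what changed: Instead of a left-to-right pass threading the previous nonzero value z_curr, B traverses the list right-to-left tracking the NEXT nonzero value (successor), builds the midpoint list back-to-front, and reverses it at the end.
import Mathlib
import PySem

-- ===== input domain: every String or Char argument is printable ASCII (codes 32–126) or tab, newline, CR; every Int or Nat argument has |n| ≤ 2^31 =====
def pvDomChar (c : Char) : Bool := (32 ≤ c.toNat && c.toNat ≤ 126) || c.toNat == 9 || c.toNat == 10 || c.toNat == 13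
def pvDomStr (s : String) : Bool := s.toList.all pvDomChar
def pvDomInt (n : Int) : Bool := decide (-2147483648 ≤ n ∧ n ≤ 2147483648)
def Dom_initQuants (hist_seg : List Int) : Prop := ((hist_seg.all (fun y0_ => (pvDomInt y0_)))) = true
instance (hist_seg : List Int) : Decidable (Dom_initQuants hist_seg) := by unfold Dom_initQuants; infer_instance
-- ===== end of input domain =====

-- B replaces A's left-to-right pass (threading the previous nonzero z_curr) by a right-to-left
-- traversal that tracks the NEXT nonzero value, builds the midpoints back-to-front and reverses.

-- `int(a + (b - a) / 2)`: with |a|,|b| ≤ 2^31 the float arithmetic is exact (half-integers well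
-- within double precision), and int() truncates toward zero.
def pyTruncMid (a b : Int) : Int := Int.tdiv (2 * a + (b - a)) 2

-- ===== PORT A =====
def initQuants (hist_seg : List Int) : List Int :=
  (hist_seg.foldl
    (fun (st : List Int × Int × Int) i =>
      if i == 0 then st
      else (st.1 ++ [pyTruncMid st.2.2 i], st.2.1 + 1, i))
    ([], 0, 0)).1

-- ===== PORT B =====
def initQuants_alt (hist_seg : List Int) : List Int :=
  let st := hist_seg.reverse.foldl
    (fun (st : List Int × Option Int) x =>
      if x == 0 then st
      else
        match st.2 with
        | some s => (st.1 ++ [pyTruncMid x s], some x)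
        | none => (st.1, some x))
    ([], none)
  let rev := match st.2 with
    | some s => st.1 ++ [Int.tdiv s 2]   -- int(succ / 2)
    | none => st.1
  rev.reverse

-- ===== PRECONDITION & SPEC =====
def Spec_initQuants (hist_seg : List Int) (out : List Int) : Prop := out = initQuants_alt hist_seg
instance (hist_seg : List Int) (out : List Int) : Decidable (Spec_initQuants hist_seg out) := by unfold Spec_initQuants; infer_instance

-- ===== CLAIM (what is proved, stated in full; the proofs are below) =====
def Claim_equal_initQuants : Prop := ∀ (hist_seg : List Int), Dom_initQuants hist_seg → Spec_initQuants hist_seg (initQuants hist_seg)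

-- ===== LEMMAS AND PROOFS =====

-- midpoints between consecutive entries, seeded with a previous value
def mids : Int → List Int → List Int
  | _, [] => []
  | z, i :: t => pyTruncMid z i :: mids i t

theorem initQuants_loop (xs : List Int) : ∀ (acc : List Int) (idx z : Int),
    (xs.foldl
      (fun (st : List Int × Int × Int) i =>
        if i == 0 then st
        else (st.1 ++ [pyTruncMid st.2.2 i], st.2.1 + 1, i))
      (acc, idx, z)).1
    = acc ++ mids z (xs.filter (fun x => x != 0)) := by
  induction xs with
  | nil => intro acc idx z; simp [mids]
  | cons x xs ih =>
    intro acc idx z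
    have ih' := ih
    simp only [beq_iff_eq] at ih'
    by_cases hx : x = 0
    · simp [hx, ih']
    · have hx' : (x != 0) = true := by simp [hx]
      simp only [List.foldl_cons, List.filter_cons, hx', beq_iff_eq, hx, if_false, ite_true]
      rw [ih', mids]
      simp

-- skipping zeros in a fold is folding over the nonzero filter
theorem foldl_skip_zero {σ : Type} (g : σ → Int → σ) (xs : List Int) : ∀ (st : σ),
    xs.foldl (fun st x => if x == 0 then st else g st x) st
    = (xs.filter (fun x => x != 0)).foldl g st := by
  induction xs with
  | nil => intro st; simp
  | cons x xs ih =>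
    intro st
    have ih' := ih
    simp only [beq_iff_eq] at ih'
    by_cases hx : x = 0
    · simp [hx, ih']
    · have hx' : (x != 0) = true := by simp [hx]
      simp [hx', hx, ih']

def stepB (st : List Int × Option Int) (x : Int) : List Int × Option Int :=
  match st.2 with
  | some s => (st.1 ++ [pyTruncMid x s], some x)
  | none => (st.1, some x)

-- folding B's step over the reverse of a (zero-free) list
theorem foldr_stepB (ys : List Int) :
    ys.foldr (fun x st => stepB st x) ([], none)
    = match ys with
      | [] => (([] : List Int), (none : Option Int))
      | h :: t => ((mids h t).reverse, some h) := by
  induction ys with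
  | nil => rfl
  | cons a t ih =>
    cases t with
    | nil => rfl
    | cons h t' =>
      simp only [List.foldr_cons] at ih ⊢
      rw [ih]
      simp [stepB, mids]

theorem tdiv_half (h : Int) : pyTruncMid 0 h = Int.tdiv h 2 := by
  unfold pyTruncMid; norm_num

-- ===== VERDICT (by name: the statement is the Claim_ definition above) =====
theorem initQuants_spec : Claim_equal_initQuants := by
  intro hist_seg _
  unfold Spec_initQuants initQuants initQuants_alt
  rw [initQuants_loop hist_seg [] 0 0]
  rw [show (fun (st : List Int × Option Int) x =>
      if x == 0 then st
      else
        match st.2 with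
        | some s => (st.1 ++ [pyTruncMid x s], some x)
        | none => (st.1, some x))
    = (fun st x => if x == 0 then st else stepB st x) from by
      funext st x; simp [stepB]]
  rw [foldl_skip_zero stepB hist_seg.reverse ([], none)]
  rw [List.filter_reverse, List.foldl_reverse, foldr_stepB]
  cases h : hist_seg.filter (fun x => x != 0) with
  | nil => simp [mids]
  | cons a t => simp [mids, tdiv_half]
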